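-- pv_equiv track=rewrite | github.com/David-Tong/leetcode-in-python | 1814-count nice pairs in an array/main.py | countNicePairs
-- ===== SOURCE A (Python) =====
-- def countNicePairs(nums):
--     """
--     :type nums: List[int]
--     :rtype: int
--     """
--     # pre-process
--     MODULO = 10 ** 9 + 7
--
--     from collections import defaultdict
--     diffs = defaultdict(int)
--
--     for num in nums:
--         diff = num - int(str(num)[::-1])
--         diffs[diff] += 1
--
--     # process
--     ans = 0
--     for diff in diffs:
--         ans += (diffs[diff] * (diffs[diff] - 1) // 2) %MODULO
--     return ans % MODULO
-- ===== SOURCE B (Python) =====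
-- def countNicePairs(nums):
--     MODULO = 10 ** 9 + 7
--     ans = 0
--     seen = {}
--     for num in nums:
--         diff = num - int(str(num)[::-1])
--         ans += seen.get(diff, 0)
--         seen[diff] = seen.get(diff, 0) + 1
--     return ans % MODULO
-- ===== Notes on version B (the rewrite author's own statement) =====
-- stated objective: alternative
-- what changed: single incremental pass keeping a running dict of diffs seen so far (each element adds the number of earlier equal-diff elements), replacing A's two phases (build the full diff table, then a second loop summing C(c,2) per key)
import Mathlib
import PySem

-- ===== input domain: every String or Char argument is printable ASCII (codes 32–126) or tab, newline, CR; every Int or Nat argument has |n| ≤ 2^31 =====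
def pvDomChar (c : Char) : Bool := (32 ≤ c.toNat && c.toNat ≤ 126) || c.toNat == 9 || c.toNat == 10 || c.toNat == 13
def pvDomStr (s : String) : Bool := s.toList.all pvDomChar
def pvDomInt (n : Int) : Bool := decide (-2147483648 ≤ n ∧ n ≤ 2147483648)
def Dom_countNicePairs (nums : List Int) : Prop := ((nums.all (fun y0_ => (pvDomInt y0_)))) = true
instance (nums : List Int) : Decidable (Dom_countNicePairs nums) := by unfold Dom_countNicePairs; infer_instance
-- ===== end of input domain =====

-- B does the same counting in one incremental pass over nums (a running `seen` dict; each element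
-- adds the number of earlier equal-diff elements) instead of A's two phases (build the full diff
-- table, then sum C(c,2) per key); proved equal on lists of nonnegative ints (on a negative
-- element both Pythons raise ValueError at int(str(num)[::-1])).

-- ===== PORT A =====
-- num - int(str(num)[::-1]); [::-1] is reverse (PySem.Str.slice?_none_none_neg_one), int() is
-- PySem.Int.ofChars?; the .getD 0 totalises the ValueError case (negative num), excluded by Pre_.
def pvDiff (n : Int) : Int := n - ((PySem.Int.ofChars? (PySem.Int.toChars n).reverse).getD 0)

def countNicePairs (nums : List Int) : Int :=
  let MODULO : Int := 10 ^ 9 + 7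
  let diffs : PySem.Dict Int Int :=
    nums.foldl (fun d num => d.modify (pvDiff num) 0 (· + 1)) PySem.Dict.empty
  let ans : Int :=
    diffs.keys.foldl
      (fun ans diff =>
        ans + PySem.Int.mod (PySem.Int.floordiv (diffs.getD diff 0 * (diffs.getD diff 0 - 1)) 2) MODULO)
      0
  PySem.Int.mod ans MODULO

-- ===== PORT B =====
def countNicePairs_alt (nums : List Int) : Int :=
  let MODULO : Int := 10 ^ 9 + 7
  let st : Int × PySem.Dict Int Int :=
    nums.foldl
      (fun p num =>
        let diff := pvDiff num
        (p.1 + p.2.getD diff 0, p.2.insert diff (p.2.getD diff 0 + 1)))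
      (0, PySem.Dict.empty)
  PySem.Int.mod st.1 MODULO

-- ===== PRECONDITION & SPEC =====
-- Pre_ excludes exactly the inputs on which both Pythons raise ValueError: a negative element
-- makes int(str(num)[::-1]) parse a string with a trailing '-'.
def Pre_countNicePairs (nums : List Int) : Prop := (nums.all (fun n => 0 ≤ n)) = true
instance (nums : List Int) : Decidable (Pre_countNicePairs nums) := by
  unfold Pre_countNicePairs; infer_instance

def pvWitness_countNicePairs : List Int := [42, 11, 24, 13, 0]

def Spec_countNicePairs (nums : List Int) (out : Int) : Prop := out = countNicePairs_alt nums
instance (nums : List Int) (out : Int) : Decidable (Spec_countNicePairs nums out) := by unfold Spec_countNicePairs; infer_instance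

-- ===== CLAIM (what is proved, stated in full; the proofs are below) =====
def Claim_equal_countNicePairs : Prop := ∀ (nums : List Int), Dom_countNicePairs nums → Pre_countNicePairs nums → Spec_countNicePairs nums (countNicePairs nums)

-- ===== LEMMAS AND PROOFS =====

-- number of pairs i < j with equal list entries, accumulated left to right
def cpairs : List Int → Int
  | [] => 0
  | x :: t => (t.count x : Int) + cpairs t

def pvC (c : Int) : Int := PySem.Int.floordiv (c * (c - 1)) 2

lemma pvC_succ (c : Int) : pvC (c + 1) = pvC c + c := by
  unfold pvC
  rw [PySem.Int.floordiv_eq_ediv_of_pos (by norm_num), PySem.Int.floordiv_eq_ediv_of_pos (by norm_num)]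
  have h : (c + 1) * (c + 1 - 1) = c * (c - 1) + c * 2 := by ring
  rw [h, Int.add_mul_ediv_right _ _ (by norm_num)]

lemma cpairs_append_singleton (l : List Int) (x : Int) :
    cpairs (l ++ [x]) = cpairs l + (l.count x : Int) := by
  induction l with
  | nil => simp [cpairs]
  | cons y t ih =>
    simp only [List.cons_append, cpairs, ih]
    have h1 : ((t ++ [x]).count y : Int) = (t.count y : Int) + (if y = x then 1 else 0) := by
      by_cases hxy : y = x <;> simp [List.count_append, List.count_singleton', hxy] <;> omega
    have h2 : ((y :: t).count x : Int) = (t.count x : Int) + (if y = x then 1 else 0) := by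
      by_cases hxy : y = x <;> simp [hxy]
    rw [h1, h2]
    split_ifs <;> ring

-- A's per-key sum of c*(c-1)//2 over the distinct values equals cpairs
lemma sum_pvC_counts (l : List Int) :
    ((PySem.Set.ofList l).map (fun k => pvC ((l.count k : Int)))).sum = cpairs l := by
  induction l using List.reverseRecOn with
  | nil => simp [cpairs, PySem.Set.ofList]
  | append_singleton t x ih =>
    rw [PySem.Set.ofList_append_singleton, cpairs_append_singleton, ← ih]
    by_cases hx : x ∈ PySem.Set.ofList t
    · rw [PySem.Set.add_of_mem hx]
      have hnd : (PySem.Set.ofList t).Nodup := PySem.Set.nodup_ofList t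
      have hperm : (PySem.Set.ofList t).Perm (x :: (PySem.Set.ofList t).erase x) :=
        List.perm_cons_erase hx
      have hg := (hperm.map (fun k => pvC (((t ++ [x]).count k : Int)))).sum_eq
      have hf := (hperm.map (fun k => pvC ((t.count k : Int)))).sum_eq
      rw [hg, hf]
      simp only [List.map_cons, List.sum_cons]
      have hcongr : ∀ k ∈ (PySem.Set.ofList t).erase x,
          pvC (((t ++ [x]).count k : Int)) = pvC ((t.count k : Int)) := by
        intro k hk
        have hkx : k ≠ x := ((List.Nodup.mem_erase_iff hnd).mp hk).1
        have hc : (t ++ [x]).count k = t.count k := by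
          simp [List.count_append, List.count_singleton']
          omega
        rw [hc]
      rw [List.map_congr_left hcongr]
      have hcx : ((t ++ [x]).count x : Int) = (t.count x : Int) + 1 := by
        simp [List.count_append]
      rw [hcx, pvC_succ]
      ring
    · rw [PySem.Set.add_of_not_mem hx]
      have hxt : x ∉ t := fun h => hx ((PySem.Set.mem_ofList t x).mpr h)
      have hcongr : ∀ k ∈ PySem.Set.ofList t,
          pvC (((t ++ [x]).count k : Int)) = pvC ((t.count k : Int)) := by
        intro k hk
        have hkx : k ≠ x := by
          intro h; subst h; exact hxt ((PySem.Set.mem_ofList t k).mp hk)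
        have hc : (t ++ [x]).count k = t.count k := by
          simp [List.count_append, List.count_singleton']
          omega
        rw [hc]
      have hcx : (t ++ [x]).count x = 1 := by
        simp [List.count_append, List.count_eq_zero_of_not_mem hxt]
      have hcx0 : (t.count x : Int) = 0 := by
        simp [List.count_eq_zero_of_not_mem hxt]
      rw [List.map_append, List.sum_append, List.map_congr_left hcongr]
      simp [hcx0]
      decide

-- folding "ans += x % M" and then taking % M once more is the plain sum mod M
lemma foldl_addmod (xs : List Int) (a : Int) :
    PySem.Int.mod (xs.foldl (fun acc x => acc + PySem.Int.mod x 1000000007) a) 1000000007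
      = PySem.Int.mod (a + xs.sum) 1000000007 := by
  induction xs generalizing a with
  | nil => simp
  | cons x t ih =>
    rw [List.foldl_cons, ih, List.sum_cons]
    rw [PySem.Int.mod_eq_emod_of_pos (by norm_num), PySem.Int.mod_eq_emod_of_pos (by norm_num),
      PySem.Int.mod_eq_emod_of_pos (by norm_num)]
    omega

-- B's fold invariant: the accumulator gains, for each element, its count so far
lemma bfold (l : List Int) (a : Int) (d : PySem.Dict Int Int) :
    (l.foldl
      (fun (p : Int × PySem.Dict Int Int) x =>
        (p.1 + p.2.getD x 0, p.2.insert x (p.2.getD x 0 + 1))) (a, d)).1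
      = a + (l.map (fun y => d.getD y 0)).sum + cpairs l := by
  induction l generalizing a d with
  | nil => simp [cpairs]
  | cons x t ih =>
    simp only [List.foldl_cons, cpairs, ih]
    have hmap : ∀ y, (d.insert x (d.getD x 0 + 1)).getD y 0
        = d.getD y 0 + (if (y == x) = true then 1 else 0) := by
      intro y
      rw [PySem.Dict.getD_insert]
      split_ifs with h h' h' <;> simp_all
    have hsum : (t.map (fun y => (d.insert x (d.getD x 0 + 1)).getD y 0)).sum
        = (t.map (fun y => d.getD y 0)).sum + (t.count x : Int) := by
      rw [List.map_congr_left (fun y _ => hmap y), PySem.List.sum_map_add_int,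
        PySem.List.sum_map_ite_one_zero]
      simp [List.count]
    rw [hsum]
    simp only [List.map_cons, List.sum_cons]
    ring

-- ===== VERDICT (by name: the statement is the Claim_ definition above) =====
theorem countNicePairs_spec : Claim_equal_countNicePairs := by
  intro nums _ _
  show countNicePairs nums = countNicePairs_alt nums
  unfold countNicePairs countNicePairs_alt
  simp only []
  have hM : ((10 : Int) ^ 9 + 7) = 1000000007 := by norm_num
  rw [hM]
  -- A's dict is the counter of the diff list
  have hA : nums.foldl (fun d num => d.modify (pvDiff num) 0 (· + 1)) PySem.Dict.empty
      = PySem.Dict.counter (nums.map pvDiff) := by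
    rw [PySem.Dict.counter_eq_foldl, List.foldl_map]
  rw [hA]
  -- B's accumulator is cpairs of the diff list
  have hB := bfold (nums.map pvDiff) 0 PySem.Dict.empty
  rw [List.foldl_map] at hB
  simp only [PySem.Dict.getD_empty, zero_add] at hB
  rw [hB]
  simp only [List.map_const', List.sum_replicate, smul_zero, zero_add]
  -- A's keys loop is the mod-fold over pvC of the counts
  have hfun : (fun (ans diff : Int) =>
        ans + PySem.Int.mod (PySem.Int.floordiv
          ((PySem.Dict.counter (nums.map pvDiff)).getD diff 0 *
            ((PySem.Dict.counter (nums.map pvDiff)).getD diff 0 - 1)) 2) 1000000007)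
      = fun ans diff => ans + PySem.Int.mod (pvC (((nums.map pvDiff).count diff : Int))) 1000000007 := by
    funext ans diff
    rw [PySem.Dict.getD_counter]
    rfl
  rw [PySem.Dict.keys_counter, hfun]
  have hmap := List.foldl_map
    (f := fun k => pvC (((nums.map pvDiff).count k : Int)))
    (g := fun (acc x : Int) => acc + PySem.Int.mod x 1000000007)
    (l := PySem.Set.ofList (nums.map pvDiff)) (init := (0 : Int))
  rw [← hmap, foldl_addmod, zero_add, sum_pvC_counts]
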